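-- pv_equiv track=rewrite | github.com/PJ2005/66-hill-cipher | implement.py | mat_inv
-- ===== SOURCE A (Python) =====
-- def mod26(x):  return ((x % 26) + 26) % 26
--
-- def mod_inv26(a):
--     a = mod26(a)
--     for x in range(1, 26):
--         if (a * x) % 26 == 1:
--             return x
--     return -1
--
-- def det2(M): return mod26(M[0][0]*M[1][1] - M[0][1]*M[1][0])
--
-- def det3(M):
--     return mod26(
--         M[0][0]*(M[1][1]*M[2][2] - M[1][2]*M[2][1])
--        -M[0][1]*(M[1][0]*M[2][2] - M[1][2]*M[2][0])
--        +M[0][2]*(M[1][0]*M[2][1] - M[1][1]*M[2][0]))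
--
-- def mat_inv(M):
--     n  = len(M)
--     d  = det2(M) if n == 2 else det3(M)
--     di = mod_inv26(d)
--     if di == -1:
--         return None
--     if n == 2:
--         adj = [[mod26( M[1][1]), mod26(-M[0][1])],
--                [mod26(-M[1][0]), mod26( M[0][0])]]
--     else:
--         def minor(ri, ci):
--             return [row[:ci]+row[ci+1:] for r, row in enumerate(M) if r != ri]
--         adj = [[mod26((1 if (i+j)%2==0 else -1) * det2(minor(j, i)))
--                 for j in range(3)] for i in range(3)]
--     return [[mod26(v * di) for v in row] for row in adj]
-- ===== SOURCE B (Python) =====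
-- def mat_inv(M):
--     # General n x n modular inverse via recursive Laplace determinant and
--     # transposed cofactor (adjugate), instead of hardcoded 2x2/3x3 formulas.
--     n = len(M)
--
--     def det(A):
--         if len(A) == 1:
--             return A[0][0] % 26
--         s = 0
--         for j in range(len(A)):
--             minor = [row[:j] + row[j + 1:] for row in A[1:]]
--             s += (-1) ** j * A[0][j] * det(minor)
--         return s % 26
--
--     d = det(M)
--     di = next((x for x in range(1, 26) if (d * x) % 26 == 1), None)
--     if di is None:
--         return None
--     cof = [[((-1) ** (i + j) *
--              det([row[:j] + row[j + 1:] for r, row in enumerate(M) if r != i])) % 26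
--             for j in range(n)] for i in range(n)]
--     return [[(cof[j][i] * di) % 26 for j in range(n)] for i in range(n)]
-- ===== Notes on version B (the rewrite author's own statement) =====
-- stated objective: alternative
-- what changed: Replaces A's two hardcoded size branches (det2/det3 closed forms plus an explicit 2x2 adjugate) with one general recursive Laplace determinant and a transposed cofactor (adjugate) matrix scaled by the modular inverse of the determinant.
-- outside the precondition, e.g. on mat_inv([[0, 2, 2], [4, 2, 7], [4, 2, 7], [-2, 2, 27]]): A returns None, B raises IndexError
import Mathlib
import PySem

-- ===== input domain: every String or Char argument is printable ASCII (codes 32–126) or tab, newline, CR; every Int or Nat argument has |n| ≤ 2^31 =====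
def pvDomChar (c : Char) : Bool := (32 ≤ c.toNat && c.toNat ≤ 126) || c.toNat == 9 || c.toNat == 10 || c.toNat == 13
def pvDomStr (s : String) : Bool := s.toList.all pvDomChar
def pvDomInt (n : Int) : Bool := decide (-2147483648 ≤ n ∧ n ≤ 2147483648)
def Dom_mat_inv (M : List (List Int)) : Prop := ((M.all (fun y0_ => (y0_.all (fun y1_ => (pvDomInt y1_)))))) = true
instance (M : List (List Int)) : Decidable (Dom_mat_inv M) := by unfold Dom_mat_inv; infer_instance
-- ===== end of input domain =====

-- B replaces A's two hardcoded size branches (det2/det3 and an explicit 2x2 adjugate) by one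
-- general recursive Laplace determinant plus a transposed cofactor matrix (objective: alternative).

-- ===== PORT A =====
-- Python % with the positive literal divisor 26 agrees with Lean's Int %, used throughout.
def pvA_mod26 (x : Int) : Int := ((x % 26) + 26) % 26

-- M[i][j]; exact whenever the indices are in range (guaranteed by Pre_; Python raises otherwise).
def pvA_g (M : List (List Int)) (i j : Nat) : Int := (M.getD i []).getD j 0

def pvA_det2 (M : List (List Int)) : Int :=
  pvA_mod26 (pvA_g M 0 0 * pvA_g M 1 1 - pvA_g M 0 1 * pvA_g M 1 0)

def pvA_det3 (M : List (List Int)) : Int :=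
  pvA_mod26 (
      pvA_g M 0 0 * (pvA_g M 1 1 * pvA_g M 2 2 - pvA_g M 1 2 * pvA_g M 2 1)
    - pvA_g M 0 1 * (pvA_g M 1 0 * pvA_g M 2 2 - pvA_g M 1 2 * pvA_g M 2 0)
    + pvA_g M 0 2 * (pvA_g M 1 0 * pvA_g M 2 1 - pvA_g M 1 1 * pvA_g M 2 0))

-- for x in range(1, 26): if (a*x) % 26 == 1: return x   /  return -1
def pvA_modInv26 (a : Int) : Int :=
  let a' := pvA_mod26 a
  (((PySem.List.pyRange 1 26 1).find? (fun x => (a' * x) % 26 == 1)).getD (-1))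

-- [row[:ci] + row[ci+1:] for r, row in enumerate(M) if r != ri]
def pvA_minor (M : List (List Int)) (ri ci : Nat) : List (List Int) :=
  ((PySem.List.enumerate M).filter (fun p => p.1 ≠ (ri : Int))).map (fun p => p.2.take ci ++ p.2.drop (ci + 1))

def mat_inv (M : List (List Int)) : Option (List (List Int)) :=
  let n := M.length
  let d := if n == 2 then pvA_det2 M else pvA_det3 M
  let di := pvA_modInv26 d
  if di == -1 then none
  else
    let adj :=
      if n == 2 then
        [[pvA_mod26 (pvA_g M 1 1), pvA_mod26 (-(pvA_g M 0 1))],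
         [pvA_mod26 (-(pvA_g M 1 0)), pvA_mod26 (pvA_g M 0 0)]]
      else
        (List.range 3).map (fun i => (List.range 3).map (fun j =>
          pvA_mod26 ((if (i + j) % 2 = 0 then (1 : Int) else -1) * pvA_det2 (pvA_minor M j i))))
    some (adj.map (fun row => row.map (fun v => pvA_mod26 (v * di))))

-- ===== PORT B =====
-- Recursive Laplace determinant along the first row (mod 26).  Python's `A[0][0]` at the base
-- case is ported with getD (exact for the non-empty rows Pre_ guarantees).
def pvB_det : List (List Int) → Int
  | [] => 0 % 26          -- len 0: the Python loop body never runs and `0 % 26` is returned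
  | [r] => r.getD 0 0 % 26
  | r0 :: rs =>
      (((List.range (r0 :: rs).length).map (fun j =>
          (-1) ^ j * r0.getD j 0 *
            pvB_det (rs.map (fun row => row.take j ++ row.drop (j + 1))))).sum) % 26
termination_by A => A.length
decreasing_by simp

def mat_inv_alt (M : List (List Int)) : Option (List (List Int)) :=
  let n := M.length
  let d := pvB_det M
  match (PySem.List.pyRange 1 26 1).find? (fun x => (d * x) % 26 == 1) with
  | none => none
  | some di =>
    let cof := (List.range n).map (fun (i : Nat) => (List.range n).map (fun (j : Nat) =>
      ((-1) ^ (i + j) *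
        pvB_det (((PySem.List.enumerate M).filter (fun p => p.1 ≠ (i : Int))).map
          (fun p => p.2.take j ++ p.2.drop (j + 1)))) % 26))
    some ((List.range n).map (fun i => (List.range n).map (fun j =>
      ((cof.getD j []).getD i 0 * di) % 26)))

-- ===== PRECONDITION & SPEC =====
-- Pre_ restricts to matrices of 2 or 3 rows, each row at least that long — the cipher's intended
-- domain: elsewhere A's hardcoded formulas raise IndexError (0/1 rows, short rows) or, for 4 or
-- more rows, return a 3x3 value read off a leading submatrix only, an artefact of the hardcoded
-- 2x2/3x3 branches.
def Pre_mat_inv (M : List (List Int)) : Prop :=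
  (M.length = 2 ∨ M.length = 3) ∧ ∀ row ∈ M, M.length ≤ row.length
instance (M : List (List Int)) : Decidable (Pre_mat_inv M) := by unfold Pre_mat_inv; infer_instance

def pvWitness_mat_inv : List (List Int) := [[3, 3], [2, 5]]

def Spec_mat_inv (M : List (List Int)) (out : Option (List (List Int))) : Prop := out = mat_inv_alt M
instance (M : List (List Int)) (out : Option (List (List Int))) : Decidable (Spec_mat_inv M out) := by unfold Spec_mat_inv; infer_instance

-- ===== CLAIM (what is proved, stated in full; the proofs are below) =====
def Claim_equal_mat_inv : Prop := ∀ (M : List (List Int)), Dom_mat_inv M → Pre_mat_inv M → Spec_mat_inv M (mat_inv M)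

-- ===== LEMMAS AND PROOFS =====

lemma pvA_mod26_eq (x : Int) : pvA_mod26 x = x % 26 := by unfold pvA_mod26; omega

lemma emod26_congr (x y : Int) (h : (x : ZMod 26) = (y : ZMod 26)) : x % 26 = y % 26 :=
  (ZMod.intCast_eq_intCast_iff x y 26).mp h

lemma cast26 (x : Int) : ((x % 26 : Int) : ZMod 26) = (x : ZMod 26) := ZMod.intCast_mod x 26

lemma mod26_idem (y : Int) : y % 26 % 26 = y % 26 := Int.emod_emod_of_dvd y dvd_rfl

lemma case2 (a b c d : Int) (t0 t1 : List Int) :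
    mat_inv [a :: b :: t0, c :: d :: t1] = mat_inv_alt [a :: b :: t0, c :: d :: t1] := by
  have hAd : pvA_det2 [a :: b :: t0, c :: d :: t1] = (a * d - b * c) % 26 := by
    simp [pvA_det2, pvA_g, pvA_mod26_eq]
  have hBd : pvB_det [a :: b :: t0, c :: d :: t1] = (a * d - b * c) % 26 := by
    simp [pvB_det, List.range_succ]
    apply emod26_congr; push_cast [cast26]; ring
  unfold mat_inv mat_inv_alt pvA_modInv26
  simp only [List.length_cons, List.length_nil, Nat.reduceAdd, beq_self_eq_true, if_pos, hAd, hBd, pvA_mod26_eq, mod26_idem]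
  cases hfind : (PySem.List.pyRange 1 26 1).find? (fun x => ((a * d - b * c) % 26 * x) % 26 == 1) with
  | none => simp
  | some x =>
    have hx1 : (x == -1) = false := by
      have hm := List.mem_of_find?_eq_some hfind
      rw [PySem.List.mem_pyRange_one] at hm
      simp; omega
    simp only [Option.getD_some, hx1]
    simp [List.range_succ, pvA_g, pvB_det]
    exact ⟨by apply emod26_congr; push_cast [cast26]; ring, by apply emod26_congr; push_cast [cast26]; ring⟩

set_option maxHeartbeats 2000000 in
lemma case3 (a b c d e f g h i : Int) (t0 t1 t2 : List Int) :
    mat_inv [a :: b :: c :: t0, d :: e :: f :: t1, g :: h :: i :: t2]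
      = mat_inv_alt [a :: b :: c :: t0, d :: e :: f :: t1, g :: h :: i :: t2] := by
  have hAd : pvA_det3 [a :: b :: c :: t0, d :: e :: f :: t1, g :: h :: i :: t2]
      = (a * (e * i - f * h) - b * (d * i - f * g) + c * (d * h - e * g)) % 26 := by
    simp [pvA_det3, pvA_g, pvA_mod26_eq]
  have hBd : pvB_det [a :: b :: c :: t0, d :: e :: f :: t1, g :: h :: i :: t2]
      = (a * (e * i - f * h) - b * (d * i - f * g) + c * (d * h - e * g)) % 26 := by
    simp [pvB_det, List.range_succ]
    apply emod26_congr; push_cast [cast26]; ring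
  unfold mat_inv mat_inv_alt pvA_modInv26
  simp only [List.length_cons, List.length_nil, Nat.reduceAdd, Nat.reduceBEq, Bool.false_eq_true,
    if_false, hAd, hBd, pvA_mod26_eq, mod26_idem]
  cases hfind : (PySem.List.pyRange 1 26 1).find?
      (fun x => ((a * (e * i - f * h) - b * (d * i - f * g) + c * (d * h - e * g)) % 26 * x) % 26 == 1) with
  | none => simp
  | some x =>
    have hx1 : (x == -1) = false := by
      have hm := List.mem_of_find?_eq_some hfind
      rw [PySem.List.mem_pyRange_one] at hm
      simp; omega
    simp only [Option.getD_some, hx1]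
    simp [List.range_succ, pvA_mod26_eq, pvA_g, pvA_det2, pvA_minor, pvB_det,
      PySem.List.enumerate_cons, PySem.List.enumerate_nil, List.filter]
    repeat' apply And.intro
    all_goals (apply emod26_congr; push_cast [cast26]; ring)

-- ===== VERDICT (by name: the statement is the Claim_ definition above) =====
theorem mat_inv_spec : Claim_equal_mat_inv := by
  intro M _ hPre
  obtain ⟨hn, hrows⟩ := hPre
  unfold Spec_mat_inv
  rcases hn with hn | hn
  · match M, hn with
    | [r0, r1], _ =>
      have h0 := hrows r0 (by simp); have h1 := hrows r1 (by simp)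
      simp at h0 h1
      match r0, h0, r1, h1 with
      | a :: b :: t0, _, c :: d :: t1, _ => exact case2 a b c d t0 t1
  · match M, hn with
    | [r0, r1, r2], _ =>
      have h0 := hrows r0 (by simp); have h1 := hrows r1 (by simp)
      have h2 := hrows r2 (by simp)
      simp at h0 h1 h2
      match r0, h0, r1, h1, r2, h2 with
      | a :: b :: c :: t0, _, d :: e :: f :: t1, _, g :: h :: i :: t2, _ =>
        exact case3 a b c d e f g h i t0 t1 t2
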